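-- pv_equiv track=rewrite | github.com/bangtugu/Algorithm | PROGRAMMERS/카운트_다운.py | solution
-- ===== SOURCE A (Python) =====
-- def solution(target):
--     dp = [[-1, -1] for i in range(target+1)]
--     single = list(range(1, 21))
--     double = set()
--     for s in single:
--         if s*2 > 20:
--             double.add(s*2)
--         if s*3 > 20:
--             double.add(s*3)
--     single.append(50)
--     double = sorted(list(double))
--
--     for i in range(1, target+1):
--         if i in single:
--             dp[i] = [1, 1]
--             continue
--         elif i in double:
--             dp[i] = [1, 0]
--             continue
--
--         count = target
--         single_count= 0
--         for j in range(max(1, i-60), i):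
--             if j <= 0: continue
--
--             if j in single:
--                 nowc = dp[i-j][0]+1
--                 nowsc = dp[i-j][1]+1
--             elif j in double:
--                 nowc = dp[i-j][0]+1
--                 nowsc = dp[i-j][1]
--             else:
--                 nowc = dp[i-j][0]+dp[j][0]
--                 nowsc = dp[i-j][1]+dp[j][1]
--
--             if nowc < count:
--                 count, single_count = nowc, nowsc
--             elif nowc == count:
--                 single_count = max(single_count, nowsc)
--
--         dp[i] = [count, single_count]
--
--     return dp[target]
-- ===== SOURCE B (Python) =====
-- def solution(target):
--     doubles = sorted(set(s * 2 for s in range(11, 21)) | set(s * 3 for s in range(7, 21)))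
--     moves = [(v, 1) for v in list(range(1, 21)) + [50]] + [(v, 0) for v in doubles]
--     dp = [(-1, -1)]
--     for i in range(1, target + 1):
--         if (i, 1) in moves:
--             dp.append((1, 1))
--         elif (i, 0) in moves:
--             dp.append((1, 0))
--         else:
--             best = None
--             for (v, s) in moves:
--                 if v < i:
--                     cand = (dp[i - v][0] + 1, dp[i - v][1] + s)
--                     if best is None or cand[0] < best[0] or (cand[0] == best[0] and cand[1] > best[1]):
--                         best = cand
--             dp.append(best)
--     return list(dp[target])
-- ===== Notes on version B (the rewrite author's own statement) =====
-- stated objective: faster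
-- what changed: B replaces A's sliding-window split convolution (dp[i] from dp[j]+dp[i-j] over a window of candidate splits, with per-j membership scans) by the classic unbounded-knapsack recurrence that peels ONE atomic throw from a precomputed (value, is-single) move list, keeping the min-throw / max-single tie-break.
-- outside the precondition, e.g. on solution(-1): A raises IndexError, B returns [-1, -1]
import Mathlib
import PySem

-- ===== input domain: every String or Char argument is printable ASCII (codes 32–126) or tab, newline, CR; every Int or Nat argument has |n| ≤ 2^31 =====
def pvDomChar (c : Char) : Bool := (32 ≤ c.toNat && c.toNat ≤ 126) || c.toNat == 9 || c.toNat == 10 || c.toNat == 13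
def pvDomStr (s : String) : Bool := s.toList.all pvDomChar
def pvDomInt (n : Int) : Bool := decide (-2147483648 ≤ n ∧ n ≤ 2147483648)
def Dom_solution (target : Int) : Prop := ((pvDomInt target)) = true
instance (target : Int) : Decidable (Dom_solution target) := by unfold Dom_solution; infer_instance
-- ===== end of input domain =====

-- B replaces A's sliding-window split convolution by the classic peel-one-atomic-throw DP
-- (measurably faster by a constant factor); equal return values are proved for every
-- nonnegative target.

-- ===== PORT A =====
-- A-side helper: dp[k][m] (two nested Python list indexings); exact where the indices are in
-- range, which is the case for every read A performs on inputs satisfying Pre_solution.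
def solnA_rd (dp : List (List Int)) (k : Int) (m : Int) : Int :=
  (PySem.List.pyGet? ((PySem.List.pyGet? dp k).getD []) m).getD (-1)

-- single = list(range(1,21)); …append(50)   (the double-building loop reads only 1..20)
def solnA_single : List Int := PySem.List.pyRange 1 21 1 ++ [50]

-- double = set(); for s in range(1,21): add s*2, s*3 when > 20; double = sorted(list(double))
def solnA_double : List Int :=
  PySem.List.sorted
    ((PySem.List.pyRange 1 21 1).foldl (fun d s =>
        let d1 := if s * 2 > 20 then PySem.Set.add d (s * 2) else d
        if s * 3 > 20 then PySem.Set.add d1 (s * 3) else d1)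
      (PySem.Set.empty : PySem.Set Int))
    (fun x => x) false

-- the body of A's outer `for i in range(1, target+1)` loop
def solnA_body (target : Int) (dp : List (List Int)) (i : Int) : List (List Int) :=
  if solnA_single.contains i then PySem.List.pySetD dp i [1, 1]
  else if solnA_double.contains i then PySem.List.pySetD dp i [1, 0]
  else
    let cs := (PySem.List.pyRange (max 1 (i - 60)) i 1).foldl (fun (cs : Int × Int) j =>
        if j ≤ 0 then cs
        else
          let now : Int × Int :=
            if solnA_single.contains j then (solnA_rd dp (i - j) 0 + 1, solnA_rd dp (i - j) 1 + 1)
            else if solnA_double.contains j then (solnA_rd dp (i - j) 0 + 1, solnA_rd dp (i - j) 1)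
            else (solnA_rd dp (i - j) 0 + solnA_rd dp j 0, solnA_rd dp (i - j) 1 + solnA_rd dp j 1)
          if now.1 < cs.1 then now
          else if now.1 = cs.1 then (cs.1, max cs.2 now.2)
          else cs) (target, 0)
    PySem.List.pySetD dp i [cs.1, cs.2]

def solution (target : Int) : List Int :=
  let dp0 : List (List Int) := (PySem.List.pyRange 0 (target + 1) 1).map (fun _ => [-1, -1])
  let dp := (PySem.List.pyRange 1 (target + 1) 1).foldl (solnA_body target) dp0
  (PySem.List.pyGet? dp target).getD [-1, -1]

-- ===== PORT B =====
-- B-side helper: dp[k]; exact where the index is in range, which holds for every read B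
-- performs on inputs satisfying Pre_solution.
def solnB_rd (dp : List (Int × Int)) (k : Int) : Int × Int :=
  (PySem.List.pyGet? dp k).getD (-1, -1)

def solnB_doubles : List Int :=
  PySem.List.sorted
    (PySem.Set.union (PySem.Set.ofList ((PySem.List.pyRange 11 21 1).map (fun s => s * 2)))
      ((PySem.List.pyRange 7 21 1).map (fun s => s * 3)))
    (fun x => x) false

def solnB_moves : List (Int × Int) :=
  (PySem.List.pyRange 1 21 1 ++ [50]).map (fun v => (v, 1)) ++ solnB_doubles.map (fun v => (v, 0))

-- the body of B's `for i in range(1, target+1)` loop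
def solnB_body (dp : List (Int × Int)) (i : Int) : List (Int × Int) :=
  if solnB_moves.contains (i, 1) then dp ++ [(1, 1)]
  else if solnB_moves.contains (i, 0) then dp ++ [(1, 0)]
  else
    let best : Option (Int × Int) := solnB_moves.foldl (fun best vs =>
        if vs.1 < i then
          let cand : Int × Int := ((solnB_rd dp (i - vs.1)).1 + 1, (solnB_rd dp (i - vs.1)).2 + vs.2)
          match best with
          | none => some cand
          | some b => if cand.1 < b.1 ∨ (cand.1 = b.1 ∧ cand.2 > b.2) then some cand else some b
        else best) none
    dp ++ [best.getD (-1, -1)]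

def solution_alt (target : Int) : List Int :=
  let dp := (PySem.List.pyRange 1 (target + 1) 1).foldl solnB_body [(-1, -1)]
  let r := solnB_rd dp target
  [r.1, r.2]

-- ===== PRECONDITION & SPEC =====
-- Pre_ excludes negative targets, on which A raises IndexError (dp is empty there, so the final dp lookup fails).
def Pre_solution (target : Int) : Prop := 0 ≤ target
instance (target : Int) : Decidable (Pre_solution target) := by unfold Pre_solution; infer_instance
def pvWitness_solution : Int := 47

def Spec_solution (target : Int) (out : List Int) : Prop := out = solution_alt target
instance (target : Int) (out : List Int) : Decidable (Spec_solution target out) := by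
  unfold Spec_solution; infer_instance

-- ===== CLAIM (what is proved, stated in full; the proofs are below) =====
def Claim_equal_solution : Prop :=
  ∀ (target : Int), Dom_solution target → Pre_solution target → Spec_solution target (solution target)

-- ===== LEMMAS AND PROOFS =====

-- the literal atomic data both programs compute
def pvSingles : List Int := [1,2,3,4,5,6,7,8,9,10,11,12,13,14,15,16,17,18,19,20,50]
def pvDoubles : List Int := [21,22,24,26,27,28,30,32,33,34,36,38,39,40,42,45,48,51,54,57,60]
def pvMoves : List (Int × Int) := pvSingles.map (fun v => (v, 1)) ++ pvDoubles.map (fun v => (v, 0))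

lemma solnA_single_eq : solnA_single = pvSingles := by decide
lemma solnA_double_eq : solnA_double = pvDoubles := by decide
lemma solnB_moves_eq : solnB_moves = pvMoves := by decide

lemma moves_contains_one (i : Int) : pvMoves.contains (i, 1) ↔ pvSingles.contains i := by
  simp only [List.contains_iff_mem, pvMoves, List.mem_append, List.mem_map]
  constructor
  · rintro (⟨v, hv, he⟩ | ⟨v, hv, he⟩)
    · obtain ⟨rfl, -⟩ := Prod.mk.injEq .. ▸ he
      simpa using hv
    · exact absurd (congrArg Prod.snd he) (by simp)
  · intro h
    exact Or.inl ⟨i, by simpa using h, rfl⟩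

lemma moves_contains_zero (i : Int) : pvMoves.contains (i, 0) ↔ pvDoubles.contains i := by
  simp only [List.contains_iff_mem, pvMoves, List.mem_append, List.mem_map]
  constructor
  · rintro (⟨v, hv, he⟩ | ⟨v, hv, he⟩)
    · exact absurd (congrArg Prod.snd he) (by simp)
    · obtain ⟨rfl, -⟩ := Prod.mk.injEq .. ▸ he
      simpa using hv
  · intro h
    exact Or.inr ⟨i, by simpa using h, rfl⟩

-- the tie-breaking minimum both inner loops compute: smaller count wins, equal count keeps max singles
def lmin (a c : Int × Int) : Int × Int :=
  if c.1 < a.1 then c else if c.1 = a.1 then (a.1, max a.2 c.2) else a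

def padd (p q : Int × Int) : Int × Int := (p.1 + q.1, p.2 + q.2)

def minC : List (Int × Int) → Int × Int
  | [] => (-1, -1)
  | c :: cs => cs.foldl lmin c

-- the order lmin minimises: lexicographic in (count, -singles)
def ple (p q : Int × Int) : Prop := p.1 < q.1 ∨ (p.1 = q.1 ∧ q.2 ≤ p.2)

-- the shared model: dp table built by the peel-one-atom recurrence
def mget (t : List (Int × Int)) (k : Int) : Int × Int := t.getD k.toNat (-1, -1)

def Fstep (t : List (Int × Int)) (i : Int) : Int × Int :=
  if pvSingles.contains i then (1, 1)
  else if pvDoubles.contains i then (1, 0)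
  else minC ((pvMoves.filter (fun vs => vs.1 < i)).map
      (fun vs => padd (mget t (i - vs.1)) (1, vs.2)))

def Ftab : Nat → List (Int × Int)
  | 0 => [(-1, -1)]
  | n+1 => Ftab n ++ [Fstep (Ftab n) ((n : Int) + 1)]

def Fval (i : Nat) : Int × Int := mget (Ftab i) (i : Int)

def candsF (i : Nat) : List (Int × Int) :=
  (pvMoves.filter (fun vs => vs.1 < (i : Int))).map
    (fun vs => padd (Fval (i - vs.1.toNat)) (1, vs.2))

-- ---- order lemmas ----
lemma ple_trans {p q r : Int × Int} (h1 : ple p q) (h2 : ple q r) : ple p r := by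
  unfold ple at *; omega

lemma ple_antisymm {p q : Int × Int} (h1 : ple p q) (h2 : ple q p) : p = q := by
  unfold ple at *
  have : p.1 = q.1 ∧ p.2 = q.2 := by omega
  exact Prod.ext this.1 this.2

lemma lmin_eq_or (a c : Int × Int) : lmin a c = a ∨ lmin a c = c := by
  unfold lmin
  split_ifs with h1 h2
  · right; rfl
  · rcases le_total c.2 a.2 with h | h
    · left; rw [max_eq_left h]
    · right; rw [max_eq_right h]
      exact Prod.ext h2.symm rfl
  · left; rfl

lemma lmin_ple_left (a c : Int × Int) : ple (lmin a c) a := by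
  unfold lmin ple; split_ifs <;> simp_all <;> omega

lemma lmin_ple_right (a c : Int × Int) : ple (lmin a c) c := by
  unfold lmin ple; split_ifs <;> simp_all <;> omega

lemma ple_lmin {x a c : Int × Int} (hx : ple x a) (hc : ple x c) : ple x (lmin a c) := by
  rcases lmin_eq_or a c with h | h <;> rw [h] <;> assumption

lemma foldl_lmin_mem (l : List (Int × Int)) (a : Int × Int) :
    List.foldl lmin a l ∈ a :: l := by
  induction l generalizing a with
  | nil => simp [List.foldl]
  | cons c cs ih =>
    simp only [List.foldl_cons]
    rcases List.mem_cons.mp (ih (lmin a c)) with h | h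
    · rw [h]
      rcases lmin_eq_or a c with h2 | h2 <;> rw [h2] <;> simp
    · exact List.mem_cons_of_mem _ (List.mem_cons_of_mem _ h)

lemma foldl_lmin_ple_init (l : List (Int × Int)) (a : Int × Int) :
    ple (List.foldl lmin a l) a := by
  induction l generalizing a with
  | nil => unfold ple; simp [List.foldl]
  | cons c cs ih =>
    exact ple_trans (ih (lmin a c)) (lmin_ple_left a c)

lemma foldl_lmin_ple_mem : ∀ (l : List (Int × Int)) (a x : Int × Int),
    x ∈ l → ple (List.foldl lmin a l) x := by
  intro l
  induction l with
  | nil => intro a x h; cases h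
  | cons c cs ih =>
    intro a x h
    rcases List.mem_cons.mp h with rfl | h
    · exact ple_trans (foldl_lmin_ple_init cs (lmin a x)) (lmin_ple_right a x)
    · exact ih (lmin a c) x h

lemma ple_foldl_lmin : ∀ (l : List (Int × Int)) (a x : Int × Int),
    ple x a → (∀ c ∈ l, ple x c) → ple x (List.foldl lmin a l) := by
  intro l
  induction l with
  | nil => intro a x hx _; simpa [List.foldl] using hx
  | cons c cs ih =>
    intro a x hx h
    exact ih (lmin a c) x (ple_lmin hx (h c (by simp))) (fun d hd => h d (by simp [hd]))

lemma minC_mem {l : List (Int × Int)} (h : l ≠ []) : minC l ∈ l := by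
  cases l with
  | nil => exact absurd rfl h
  | cons c cs => exact foldl_lmin_mem cs c

lemma minC_ple {l : List (Int × Int)} {x : Int × Int} (h : x ∈ l) : ple (minC l) x := by
  cases l with
  | nil => cases h
  | cons c cs =>
    rcases List.mem_cons.mp h with h | h
    · subst h; exact foldl_lmin_ple_init cs x
    · exact foldl_lmin_ple_mem cs c x h


lemma padd_monoR {p q : Int × Int} (r : Int × Int) (h : ple p q) :
    ple (padd p r) (padd q r) := by
  unfold ple padd at *; simp at *; omega

lemma padd_comm (p q : Int × Int) : padd p q = padd q p := by
  unfold padd; exact Prod.ext (by ring) (by ring)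

lemma padd_assoc (p q r : Int × Int) : padd (padd p q) r = padd p (padd q r) := by
  unfold padd; exact Prod.ext (by ring) (by ring)

lemma lmin_if (a c : Int × Int) :
    (if c.1 < a.1 ∨ (c.1 = a.1 ∧ c.2 > a.2) then c else a) = lmin a c := by
  unfold lmin
  by_cases hq : c.1 < a.1
  · rw [if_pos (Or.inl hq), if_pos hq]
  · by_cases hr : c.1 = a.1
    · by_cases hs : c.2 > a.2
      · rw [if_pos (Or.inr ⟨hr, hs⟩), if_neg hq, if_pos hr]
        exact Prod.ext hr (max_eq_right hs.le).symm
      · rw [if_neg (by push_neg; exact ⟨by omega, fun _ => by omega⟩), if_neg hq, if_pos hr]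
        exact Prod.ext rfl (max_eq_left (by omega)).symm
    · rw [if_neg (by push_neg; exact ⟨by omega, fun hh => absurd hh hr⟩), if_neg hq, if_neg hr]

lemma foldl_congr_mem {α β : Type} (l : List β) (f g : α → β → α) (a : α)
    (h : ∀ acc, ∀ x ∈ l, f acc x = g acc x) : l.foldl f a = l.foldl g a := by
  induction l generalizing a with
  | nil => rfl
  | cons x xs ih =>
    simp only [List.foldl_cons]
    rw [h a x (by simp)]
    exact ih (g a x) (fun acc y hy => h acc y (by simp [hy]))

-- ---- facts about the move table ----
lemma moves_facts : ∀ vs ∈ pvMoves, 1 ≤ vs.1 ∧ vs.1 ≤ 60 ∧ 0 ≤ vs.2 := by decide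

lemma moves_single : ∀ vs ∈ pvMoves, vs.2 ≠ 0 → vs.2 = 1 ∧ pvSingles.contains vs.1 := by decide

lemma moves_double : ∀ vs ∈ pvMoves, vs.2 = 0 →
    pvDoubles.contains vs.1 ∧ ¬ pvSingles.contains vs.1 := by decide

lemma one_mem_moves : ((1, 1) : Int × Int) ∈ pvMoves := by decide

lemma singles_pos : ∀ v ∈ pvSingles, (1 : Int) ≤ v := by decide
lemma doubles_pos : ∀ v ∈ pvDoubles, (1 : Int) ≤ v := by decide

lemma atomic_move {x : Int} (h : pvSingles.contains x ∨ pvDoubles.contains x) :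
    ∃ vs ∈ pvMoves, vs.1 = x ∧
      ((pvSingles.contains x ∧ vs.2 = 1) ∨ (¬ pvSingles.contains x ∧ vs.2 = 0)) := by
  by_cases hs : pvSingles.contains x
  · refine ⟨(x, 1), ?_, rfl, Or.inl ⟨hs, rfl⟩⟩
    unfold pvMoves
    exact List.mem_append_left _ (List.mem_map_of_mem (by simpa using hs))
  · rcases h with h | h
    · exact absurd h hs
    · refine ⟨(x, 0), ?_, rfl, Or.inr ⟨hs, rfl⟩⟩
      unfold pvMoves
      exact List.mem_append_right _ (List.mem_map_of_mem (by simpa using h))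

-- ---- table plumbing ----
lemma length_Ftab (n : Nat) : (Ftab n).length = n + 1 := by
  induction n with
  | zero => rfl
  | succ n ih => simp [Ftab, ih]

lemma mget_Ftab (n : Nat) (m : Int) (h0 : 0 ≤ m) (h : m.toNat ≤ n) :
    mget (Ftab n) m = Fval m.toNat := by
  induction n with
  | zero =>
    have : m = 0 := by omega
    subst this; rfl
  | succ n ih =>
    rcases Nat.lt_or_ge m.toNat (n + 1) with hlt | hge
    · have h1 : mget (Ftab n) m = Fval m.toNat := ih (by omega)
      unfold mget at h1 ⊢
      rw [Ftab, List.getD_eq_getElem?_getD,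
          List.getElem?_append_left (by rw [length_Ftab]; omega),
          ← List.getD_eq_getElem?_getD]
      exact h1
    · have hm : m.toNat = n + 1 := by omega
      rw [hm]
      unfold Fval mget
      rw [show ((n + 1 : Nat) : Int).toNat = m.toNat from by omega, hm]


lemma Fval_succ (n : Nat) : Fval (n + 1) = Fstep (Ftab n) ((n : Int) + 1) := by
  unfold Fval mget
  rw [Ftab]
  rw [List.getD_append_right _ _ _ _ (by rw [length_Ftab]; omega)]
  simp [length_Ftab]

lemma Fval_single {i : Nat} (h : pvSingles.contains (i : Int)) : Fval i = (1, 1) := by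
  have h1 : 1 ≤ i := by
    have := singles_pos (i : Int) (by simpa using h); omega
  obtain ⟨n, rfl⟩ : ∃ n, i = n + 1 := ⟨i - 1, by omega⟩
  rw [Fval_succ]
  unfold Fstep
  rw [show ((n : Int) + 1) = ((n + 1 : Nat) : Int) by push_cast; ring, if_pos h]

lemma Fval_double {i : Nat} (h : pvDoubles.contains (i : Int))
    (hs : ¬ pvSingles.contains (i : Int)) : Fval i = (1, 0) := by
  have h1 : 1 ≤ i := by
    have := doubles_pos (i : Int) (by simpa using h); omega
  obtain ⟨n, rfl⟩ : ∃ n, i = n + 1 := ⟨i - 1, by omega⟩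
  rw [Fval_succ]
  unfold Fstep
  rw [show ((n : Int) + 1) = ((n + 1 : Nat) : Int) by push_cast; ring, if_neg hs, if_pos h]

lemma Fval_rec {i : Nat} (h1 : 1 ≤ i) (hs : ¬ pvSingles.contains (i : Int))
    (hd : ¬ pvDoubles.contains (i : Int)) : Fval i = minC (candsF i) := by
  obtain ⟨n, rfl⟩ : ∃ n, i = n + 1 := ⟨i - 1, by omega⟩
  rw [Fval_succ]
  unfold Fstep
  rw [show ((n : Int) + 1) = ((n + 1 : Nat) : Int) by push_cast; ring, if_neg hs, if_neg hd]
  unfold candsF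
  congr 1
  apply List.map_congr_left
  intro vs hvs
  have hmem := List.mem_filter.mp hvs
  have hf := moves_facts vs hmem.1
  have hlt : vs.1 < ((n + 1 : Nat) : Int) := by simpa using hmem.2
  congr 1
  rw [mget_Ftab n _ (by omega) (by omega)]
  congr 1
  omega

lemma candsF_ne {i : Nat} (h2 : 2 ≤ i) : candsF i ≠ [] := by
  unfold candsF
  have : ((1, 1) : Int × Int) ∈ pvMoves.filter (fun vs => vs.1 < (i : Int)) :=
    List.mem_filter.mpr ⟨one_mem_moves, by simp; omega⟩
  intro hc
  rw [List.map_eq_nil_iff] at hc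
  rw [hc] at this
  cases this

lemma non_atomic_two {i : Nat} (h1 : 1 ≤ i) (hs : ¬ pvSingles.contains (i : Int)) : 2 ≤ i := by
  rcases Nat.lt_or_ge i 2 with h | h
  · have hi : i = 1 := by omega
    subst hi
    exact absurd (by decide) hs
  · exact h

-- ---- semantic facts about Fval ----
lemma Fval_bounds : ∀ i : Nat, 1 ≤ i →
    1 ≤ (Fval i).1 ∧ 0 ≤ (Fval i).2 ∧ (Fval i).1 ≤ (i : Int) := by
  intro i
  induction i using Nat.strong_induction_on with
  | _ i ih =>
    intro h1
    by_cases hs : pvSingles.contains (i : Int)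
    · rw [Fval_single hs]; simp; omega
    by_cases hd : pvDoubles.contains (i : Int)
    · rw [Fval_double hd hs]; simp; omega
    have h2 : 2 ≤ i := non_atomic_two h1 hs
    rw [Fval_rec h1 hs hd]
    have hcand : ∀ c ∈ candsF i, 2 ≤ c.1 ∧ 0 ≤ c.2 := by
      intro c hc
      unfold candsF at hc
      rcases List.mem_map.mp hc with ⟨vs, hvs, rfl⟩
      have hmem := List.mem_filter.mp hvs
      have hf := moves_facts vs hmem.1
      have hlt : vs.1 < (i : Int) := by simpa using hmem.2
      have hsub : i - vs.1.toNat < i := by omega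
      have hsub1 : 1 ≤ i - vs.1.toNat := by omega
      have := ih _ hsub hsub1
      unfold padd
      constructor <;> simp <;> omega
    have hmem := minC_mem (candsF_ne h2)
    have hb := hcand _ hmem
    refine ⟨by omega, by omega, ?_⟩
    -- use the (1,1) candidate for the upper bound
    have hone : padd (Fval (i - 1)) (1, 1) ∈ candsF i := by
      unfold candsF
      refine List.mem_map.mpr ⟨(1, 1), List.mem_filter.mpr ⟨one_mem_moves, by simp; omega⟩, ?_⟩
      norm_num
    have hple := minC_ple hone
    have hprev := ih (i - 1) (by omega) (by omega)
    unfold ple padd at hple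
    simp at hple
    omega

lemma Fval_peel {m : Nat} (vs : Int × Int) (hvs : vs ∈ pvMoves)
    (hlt : vs.1 < (m : Int)) :
    ple (Fval m) (padd (Fval (m - vs.1.toNat)) (1, vs.2)) := by
  have hf := moves_facts vs hvs
  have h1 : 1 ≤ m := by omega
  have hsub1 : 1 ≤ m - vs.1.toNat := by omega
  have hb := Fval_bounds (m - vs.1.toNat) hsub1
  by_cases hs : pvSingles.contains (m : Int)
  · rw [Fval_single hs]; unfold ple padd; simp; omega
  by_cases hd : pvDoubles.contains (m : Int)
  · rw [Fval_double hd hs]; unfold ple padd; simp; omega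
  · rw [Fval_rec h1 hs hd]
    apply minC_ple
    unfold candsF
    exact List.mem_map.mpr ⟨vs, List.mem_filter.mpr ⟨hvs, by simpa using hlt⟩, rfl⟩

lemma Fval_attained {i : Nat} (h1 : 1 ≤ i) (hs : ¬ pvSingles.contains (i : Int))
    (hd : ¬ pvDoubles.contains (i : Int)) :
    ∃ vs ∈ pvMoves, vs.1 < (i : Int) ∧ Fval i = padd (Fval (i - vs.1.toNat)) (1, vs.2) := by
  have h2 : 2 ≤ i := non_atomic_two h1 hs
  have hmem := minC_mem (candsF_ne h2)
  rw [← Fval_rec h1 hs hd] at hmem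
  unfold candsF at hmem
  rcases List.mem_map.mp hmem with ⟨vs, hvs, heq⟩
  have hmemf := List.mem_filter.mp hvs
  exact ⟨vs, hmemf.1, by simpa using hmemf.2, heq.symm⟩

lemma Fval_atomic_val {x : Nat} (h1 : 1 ≤ x)
    (h : pvSingles.contains (x : Int) ∨ pvDoubles.contains (x : Int)) :
    ∃ vs ∈ pvMoves, vs.1 = (x : Int) ∧ Fval x = (1, vs.2) := by
  rcases atomic_move h with ⟨vs, hm, hx, hcase⟩
  refine ⟨vs, hm, hx, ?_⟩
  rcases hcase with ⟨hsx, h2⟩ | ⟨hsx, h2⟩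
  · rw [Fval_single hsx, h2]
  · rcases h with h | h
    · exact absurd h hsx
    · rw [Fval_double h hsx, h2]

lemma Fval_subadd : ∀ x : Nat, 1 ≤ x → ∀ y : Nat, 1 ≤ y →
    ple (Fval (x + y)) (padd (Fval x) (Fval y)) := by
  intro x
  induction x using Nat.strong_induction_on with
  | _ x ih =>
    intro hx y hy
    have hbx := Fval_bounds x hx
    have hby := Fval_bounds y hy
    by_cases hxy : pvSingles.contains ((x + y : Nat) : Int) ∨ pvDoubles.contains ((x + y : Nat) : Int)
    · -- x+y atomic: its count is 1, strictly below any sum of two counts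
      rcases Fval_atomic_val (by omega) hxy with ⟨vs, _, _, hval⟩
      rw [hval]
      unfold ple padd; left; simp; omega
    · push_neg at hxy
      by_cases hxa : pvSingles.contains (x : Int) ∨ pvDoubles.contains (x : Int)
      · -- x is itself an atomic move: peel it from x+y
        rcases Fval_atomic_val hx hxa with ⟨vs, hm, hx1, hval⟩
        have hpeel := Fval_peel vs hm (show vs.1 < ((x + y : Nat) : Int) by rw [hx1]; push_cast; omega)
        have : x + y - vs.1.toNat = y := by omega
        rw [this] at hpeel
        rw [hval, padd_comm]
        exact hpeel
      · -- x composite: use its attained decomposition and induct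
        push_neg at hxa
        rcases Fval_attained hx hxa.1 hxa.2 with ⟨vs, hm, hlt, hdec⟩
        have hf := moves_facts vs hm
        have hu1 : 1 ≤ vs.1.toNat := by omega
        have hux : vs.1.toNat < x := by omega
        have hpeel := Fval_peel vs hm (show vs.1 < ((x + y : Nat) : Int) by push_cast; omega)
        have hstep : x + y - vs.1.toNat = (x - vs.1.toNat) + y := by omega
        rw [hstep] at hpeel
        have hih := ih (x - vs.1.toNat) (by omega) (by omega) y hy
        have hmono := padd_monoR ((1 : Int), vs.2) hih
        have halg : padd (padd (Fval (x - vs.1.toNat)) (Fval y)) (1, vs.2)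
            = padd (Fval x) (Fval y) := by
          rw [hdec, padd_assoc, padd_assoc, padd_comm (Fval y)]
        rw [halg] at hmono
        exact ple_trans hpeel hmono

lemma Fval_init_dom {i : Nat} (T : Int) (h1 : 1 ≤ i) (hT : (i : Int) ≤ T) :
    ple (Fval i) (T, 0) := by
  have hb := Fval_bounds i h1
  unfold ple; simp; omega

-- the value A's inner loop computes equals Fval
lemma Astep_eq (T : Int) (i : Nat) (h1 : 1 ≤ i) (hT : (i : Int) ≤ T)
    (hs : ¬ pvSingles.contains (i : Int)) (hd : ¬ pvDoubles.contains (i : Int)) :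
    List.foldl lmin (T, 0) ((PySem.List.pyRange (max 1 ((i : Int) - 60)) (i : Int) 1).map
      (fun j => padd (Fval ((i : Int) - j).toNat) (Fval j.toNat))) = Fval i := by
  apply ple_antisymm
  · -- fold ≤ Fval i : the attained atomic decomposition appears among the window candidates
    rcases Fval_attained h1 hs hd with ⟨vs, hm, hlt, hdec⟩
    have hf := moves_facts vs hm
    have hjmem : (i : Int) - vs.1 ∈ PySem.List.pyRange (max 1 ((i : Int) - 60)) (i : Int) 1 := by
      rw [PySem.List.mem_pyRange_one]
      omega
    have hval : padd (Fval ((i : Int) - ((i : Int) - vs.1)).toNat)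
        (Fval ((i : Int) - vs.1).toNat) = Fval i := by
      have e1 : ((i : Int) - ((i : Int) - vs.1)).toNat = vs.1.toNat := by omega
      have e2 : ((i : Int) - vs.1).toNat = i - vs.1.toNat := by omega
      rw [e1, e2]
      rcases Fval_atomic_val (x := vs.1.toNat) (by omega)
          (by rw [show ((vs.1.toNat : Nat) : Int) = vs.1 by omega]
              rcases (Decidable.em (vs.2 = 0)) with h0 | h0
              · exact Or.inr (moves_double vs hm h0).1
              · exact Or.inl (moves_single vs hm h0).2) with ⟨ws, hwm, hw1, hwval⟩
      -- identify the flag: Fval vs.1.toNat = (1, vs.2)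
      have hflag : Fval vs.1.toNat = (1, vs.2) := by
        rcases (Decidable.em (vs.2 = 0)) with h0 | h0
        · have hdd := moves_double vs hm h0
          rw [h0]
          exact Fval_double (by rw [show ((vs.1.toNat : Nat) : Int) = vs.1 by omega]; exact hdd.1)
            (by rw [show ((vs.1.toNat : Nat) : Int) = vs.1 by omega]; exact hdd.2)
        · have hss := moves_single vs hm h0
          rw [hss.1]
          exact Fval_single (by rw [show ((vs.1.toNat : Nat) : Int) = vs.1 by omega]; exact hss.2)
      rw [hflag, hdec, padd_comm]
    have := foldl_lmin_ple_mem ((PySem.List.pyRange (max 1 ((i : Int) - 60)) (i : Int) 1).map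
        (fun j => padd (Fval ((i : Int) - j).toNat) (Fval j.toNat))) ((T, 0)) _
        (List.mem_map_of_mem hjmem)
    rw [hval] at this
    exact this
  · -- Fval i ≤ fold : every window candidate is a split, dominated by subadditivity
    apply ple_foldl_lmin _ _ _ (Fval_init_dom T h1 hT)
    intro c hc
    rcases List.mem_map.mp hc with ⟨j, hj, rfl⟩
    rw [PySem.List.mem_pyRange_one] at hj
    have hj1 : 1 ≤ j := by omega
    have hji : j < (i : Int) := by omega
    have hsum : ((i : Int) - j).toNat + j.toNat = i := by omega
    have := Fval_subadd (((i : Int) - j).toNat) (by omega) (j.toNat) (by omega)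
    rw [hsum] at this
    exact this

-- ---- port A equals the model ----
def tblA (T : Int) (t : Nat) : List (List Int) :=
  (List.range (T.toNat + 1)).map
    (fun m => if 1 ≤ m ∧ m ≤ t then [(Fval m).1, (Fval m).2] else [-1, -1])

lemma length_tblA (T : Int) (t : Nat) : (tblA T t).length = T.toNat + 1 := by
  simp [tblA]

lemma tblA_rd (T : Int) (t : Nat) (k : Int) (m : Int) (hm : m = 0 ∨ m = 1)
    (hk1 : 1 ≤ k) (hk2 : k.toNat ≤ t) (hkT : k ≤ T) :
    solnA_rd (tblA T t) k m = (if m = 0 then (Fval k.toNat).1 else (Fval k.toNat).2) := by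
  have hlt : k.toNat < T.toNat + 1 := by omega
  have hget : PySem.List.pyGet? (tblA T t) k = some [(Fval k.toNat).1, (Fval k.toNat).2] := by
    rw [PySem.List.pyGet?_of_nonneg _ (by omega : (0:Int) ≤ k)]
    unfold tblA
    rw [List.getElem?_map, List.getElem?_range hlt]
    simp only [Option.map_some]
    rw [if_pos ⟨by omega, hk2⟩]
  unfold solnA_rd
  rw [hget]
  rcases hm with rfl | rfl <;> simp [PySem.List.pyGet?, PySem.List.pyIdx?]

lemma tblA_zero (T : Int) (hT : 0 ≤ T) :
    (PySem.List.pyRange 0 (T + 1) 1).map (fun _ => ([-1, -1] : List Int)) = tblA T 0 := by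
  unfold tblA
  apply List.ext_getElem
  · simp [PySem.List.length_pyRange_one]; omega
  · intro n h1 h2
    simp only [List.getElem_map, List.getElem_range]
    rw [if_neg (by omega)]

lemma tblA_set (T : Int) (t : Nat) (h1 : 1 ≤ t) (ht : (t : Int) ≤ T) :
    PySem.List.pySetD (tblA T (t - 1)) (t : Int) [(Fval t).1, (Fval t).2] = tblA T t := by
  rw [PySem.List.pySetD_of_nonneg _ _ (by omega)]
  apply List.ext_getElem
  · simp [length_tblA, tblA]
  · intro n hn1 hn2
    rw [length_tblA] at hn2
    unfold tblA
    rw [List.getElem_set]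
    simp only [List.getElem_map, List.getElem_range]
    rcases Decidable.em ((t : Int).toNat = n) with he | he
    · rw [if_pos he]
      have : n = t := by omega
      subst this
      rw [if_pos ⟨by omega, le_refl _⟩]
    · rw [if_neg he]
      have hne : n ≠ t := fun hh => he (by simp [hh])
      by_cases hc : 1 ≤ n ∧ n ≤ t - 1
      · rw [if_pos hc, if_pos (by omega)]
      · rw [if_neg hc, if_neg (by omega)]

lemma bodyA_step (T : Int) (t : Nat) (h1 : 1 ≤ t) (ht : (t : Int) ≤ T) :
    solnA_body T (tblA T (t - 1)) (t : Int) = tblA T t := by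
  unfold solnA_body
  rw [solnA_single_eq, solnA_double_eq]
  by_cases hs : pvSingles.contains (t : Int)
  · rw [if_pos hs]
    rw [show ([1, 1] : List Int) = [(Fval t).1, (Fval t).2] by rw [Fval_single hs]]
    exact tblA_set T t h1 ht
  rw [if_neg hs]
  by_cases hd : pvDoubles.contains (t : Int)
  · rw [if_pos hd]
    rw [show ([1, 0] : List Int) = [(Fval t).1, (Fval t).2] by rw [Fval_double hd hs]]
    exact tblA_set T t h1 ht
  rw [if_neg hd]
  have hinner :
      (PySem.List.pyRange (max 1 ((t : Int) - 60)) (t : Int) 1).foldl (fun (cs : Int × Int) j =>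
        if j ≤ 0 then cs
        else
          let now : Int × Int :=
            if pvSingles.contains j then
              (solnA_rd (tblA T (t - 1)) ((t : Int) - j) 0 + 1, solnA_rd (tblA T (t - 1)) ((t : Int) - j) 1 + 1)
            else if pvDoubles.contains j then
              (solnA_rd (tblA T (t - 1)) ((t : Int) - j) 0 + 1, solnA_rd (tblA T (t - 1)) ((t : Int) - j) 1)
            else (solnA_rd (tblA T (t - 1)) ((t : Int) - j) 0 + solnA_rd (tblA T (t - 1)) j 0,
                  solnA_rd (tblA T (t - 1)) ((t : Int) - j) 1 + solnA_rd (tblA T (t - 1)) j 1)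
          if now.1 < cs.1 then now
          else if now.1 = cs.1 then (cs.1, max cs.2 now.2)
          else cs) (T, 0) = Fval t := by
    have hcong : ∀ (cs : Int × Int), ∀ j ∈ PySem.List.pyRange (max 1 ((t : Int) - 60)) (t : Int) 1,
        (if j ≤ 0 then cs
         else
          let now : Int × Int :=
            if pvSingles.contains j then
              (solnA_rd (tblA T (t - 1)) ((t : Int) - j) 0 + 1, solnA_rd (tblA T (t - 1)) ((t : Int) - j) 1 + 1)
            else if pvDoubles.contains j then
              (solnA_rd (tblA T (t - 1)) ((t : Int) - j) 0 + 1, solnA_rd (tblA T (t - 1)) ((t : Int) - j) 1)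
            else (solnA_rd (tblA T (t - 1)) ((t : Int) - j) 0 + solnA_rd (tblA T (t - 1)) j 0,
                  solnA_rd (tblA T (t - 1)) ((t : Int) - j) 1 + solnA_rd (tblA T (t - 1)) j 1)
          if now.1 < cs.1 then now
          else if now.1 = cs.1 then (cs.1, max cs.2 now.2)
          else cs)
        = lmin cs (padd (Fval ((t : Int) - j).toNat) (Fval j.toNat)) := by
      intro cs j hj
      rw [PySem.List.mem_pyRange_one] at hj
      have hj1 : 1 ≤ j := by omega
      have hjt : j ≤ (t : Int) - 1 := by omega
      have h2 : 2 ≤ t := by omega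
      rw [if_neg (by omega)]
      have hrd0 : solnA_rd (tblA T (t - 1)) ((t : Int) - j) 0 = (Fval ((t : Int) - j).toNat).1 := by
        rw [tblA_rd T (t - 1) _ 0 (Or.inl rfl) (by omega) (by omega) (by omega)]; simp
      have hrd1 : solnA_rd (tblA T (t - 1)) ((t : Int) - j) 1 = (Fval ((t : Int) - j).toNat).2 := by
        rw [tblA_rd T (t - 1) _ 1 (Or.inr rfl) (by omega) (by omega) (by omega)]; simp
      have hrd0j : solnA_rd (tblA T (t - 1)) j 0 = (Fval j.toNat).1 := by
        rw [tblA_rd T (t - 1) _ 0 (Or.inl rfl) (by omega) (by omega) (by omega)]; simp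
      have hrd1j : solnA_rd (tblA T (t - 1)) j 1 = (Fval j.toNat).2 := by
        rw [tblA_rd T (t - 1) _ 1 (Or.inr rfl) (by omega) (by omega) (by omega)]; simp
      have hnow :
          (if pvSingles.contains j then
              (solnA_rd (tblA T (t - 1)) ((t : Int) - j) 0 + 1, solnA_rd (tblA T (t - 1)) ((t : Int) - j) 1 + 1)
            else if pvDoubles.contains j then
              (solnA_rd (tblA T (t - 1)) ((t : Int) - j) 0 + 1, solnA_rd (tblA T (t - 1)) ((t : Int) - j) 1)
            else (solnA_rd (tblA T (t - 1)) ((t : Int) - j) 0 + solnA_rd (tblA T (t - 1)) j 0,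
                  solnA_rd (tblA T (t - 1)) ((t : Int) - j) 1 + solnA_rd (tblA T (t - 1)) j 1))
          = padd (Fval ((t : Int) - j).toNat) (Fval j.toNat) := by
        have hjcast : ((j.toNat : Nat) : Int) = j := by omega
        by_cases hjs : pvSingles.contains j
        · rw [if_pos hjs, hrd0, hrd1]
          rw [show Fval j.toNat = (1, 1) from Fval_single (by rw [hjcast]; exact hjs)]
          unfold padd; rfl
        rw [if_neg hjs]
        by_cases hjd : pvDoubles.contains j
        · rw [if_pos hjd, hrd0, hrd1]
          rw [show Fval j.toNat = (1, 0) from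
            Fval_double (by rw [hjcast]; exact hjd) (by rw [hjcast]; exact hjs)]
          unfold padd; simp
        · rw [if_neg hjd, hrd0, hrd1, hrd0j, hrd1j]
          unfold padd; rfl
      simp only [hnow]
      unfold lmin
      rfl
    rw [foldl_congr_mem _ _ _ _ hcong]
    rw [← List.foldl_map]
    exact Astep_eq T t h1 ht hs hd
  simp only [hinner]
  exact tblA_set T t h1 ht

lemma foldA_inv (T : Int) (hT : 0 ≤ T) : ∀ t : Nat, (t : Int) ≤ T →
    (PySem.List.pyRange 1 ((t : Int) + 1) 1).foldl (solnA_body T) (tblA T 0) = tblA T t := by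
  intro t
  induction t with
  | zero =>
    intro _
    rw [PySem.List.pyRange_one_eq_nil (by omega)]
    rfl
  | succ t ih =>
    intro ht
    rw [show ((t + 1 : Nat) : Int) + 1 = ((t : Int) + 1) + 1 by push_cast; ring]
    rw [PySem.List.pyRange_one_succ_right (by omega)]
    rw [List.foldl_append]
    rw [ih (by omega)]
    simp only [List.foldl]
    have := bodyA_step T (t + 1) (by omega) (by push_cast; omega)
    rw [show ((t + 1 : Nat) : Int) = (t : Int) + 1 by push_cast; ring] at this
    rw [show (t + 1) - 1 = t by omega] at this
    exact this

-- ---- port B equals the model ----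
def tblB (t : Nat) : List (Int × Int) :=
  (List.range (t + 1)).map (fun m => if 1 ≤ m then Fval m else (-1, -1))


lemma tblB_rd (t : Nat) (k : Int) (hk1 : 1 ≤ k) (hk2 : k.toNat ≤ t) :
    solnB_rd (tblB t) k = Fval k.toNat := by
  unfold solnB_rd tblB
  rw [PySem.List.pyGet?_of_nonneg _ (by omega)]
  rw [List.getElem?_map, List.getElem?_range (by omega)]
  simp only [Option.map_some, Option.getD_some]
  rw [if_pos (by omega)]

-- the Option-fold of B's inner loop, related to foldl lmin
lemma optfold_some (l : List (Int × Int)) (p : Int × Int → Prop) [DecidablePred p]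
    (c : Int × Int → Int × Int) (a : Int × Int) :
    l.foldl (fun best vs =>
        if p vs then
          match best with
          | none => some (c vs)
          | some b => if (c vs).1 < b.1 ∨ ((c vs).1 = b.1 ∧ (c vs).2 > b.2) then some (c vs) else some b
        else best) (some a)
      = some (List.foldl lmin a ((l.filter (fun vs => decide (p vs))).map c)) := by
  induction l generalizing a with
  | nil => rfl
  | cons vs rest ih =>
    by_cases hp : p vs
    · simp only [List.foldl_cons, List.filter_cons, decide_eq_true hp, if_pos hp, if_true,
        List.map_cons]
      rw [show (if (c vs).1 < a.1 ∨ ((c vs).1 = a.1 ∧ (c vs).2 > a.2) then some (c vs) else some a)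
            = some (lmin a (c vs)) by rw [← apply_ite some, lmin_if]]
      rw [ih (lmin a (c vs))]
    · simp only [List.foldl_cons, List.filter_cons, decide_eq_false hp, if_neg hp, if_false]
      exact ih a

lemma optfold_none (l : List (Int × Int)) (p : Int × Int → Prop) [DecidablePred p]
    (c : Int × Int → Int × Int) :
    l.foldl (fun best vs =>
        if p vs then
          match best with
          | none => some (c vs)
          | some b => if (c vs).1 < b.1 ∨ ((c vs).1 = b.1 ∧ (c vs).2 > b.2) then some (c vs) else some b
        else best) none
      = match (l.filter (fun vs => decide (p vs))).map c with
        | [] => none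
        | x :: xs => some (List.foldl lmin x xs) := by
  induction l with
  | nil => rfl
  | cons vs rest ih =>
    by_cases hp : p vs
    · simp only [List.foldl, List.filter, if_pos hp, decide_eq_true hp, List.map]
      exact optfold_some rest p c (c vs)
    · simp only [List.foldl, List.filter, if_neg hp]
      rw [ih]
      congr 1
      simp [List.filter, hp]

lemma bodyB_step (t : Nat) (h1 : 1 ≤ t) :
    solnB_body (tblB (t - 1)) (t : Int) = tblB t := by
  have happ : tblB t = tblB (t - 1) ++ [Fval t] := by
    unfold tblB
    rw [show t + 1 = (t - 1 + 1) + 1 by omega, List.range_succ, List.map_append]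
    congr 1
    simp only [List.map]
    rw [if_pos (by omega), show t - 1 + 1 = t by omega]
  unfold solnB_body
  rw [solnB_moves_eq]
  by_cases hs : pvSingles.contains (t : Int)
  · rw [if_pos ((moves_contains_one (t : Int)).mpr hs), happ, Fval_single hs]
  rw [if_neg (fun hh => hs ((moves_contains_one (t : Int)).mp hh))]
  by_cases hd : pvDoubles.contains (t : Int)
  · rw [if_pos ((moves_contains_zero (t : Int)).mpr hd), happ, Fval_double hd hs]
  rw [if_neg (fun hh => hd ((moves_contains_zero (t : Int)).mp hh))]
  have h2 : 2 ≤ t := non_atomic_two h1 hs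
  have hfold := optfold_none pvMoves (fun vs => vs.1 < (t : Int))
      (fun vs => ((solnB_rd (tblB (t - 1)) ((t : Int) - vs.1)).1 + 1,
                  (solnB_rd (tblB (t - 1)) ((t : Int) - vs.1)).2 + vs.2))
  simp only [hfold]
  have hmapeq : ((pvMoves.filter (fun vs => decide (vs.1 < (t : Int)))).map
      (fun vs => ((solnB_rd (tblB (t - 1)) ((t : Int) - vs.1)).1 + 1,
                  (solnB_rd (tblB (t - 1)) ((t : Int) - vs.1)).2 + vs.2))) = candsF t := by
    unfold candsF
    apply List.map_congr_left
    intro vs hvs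
    have hmem := List.mem_filter.mp hvs
    have hf := moves_facts vs hmem.1
    have hlt : vs.1 < (t : Int) := by simpa using hmem.2
    rw [tblB_rd (t - 1) _ (by omega) (by omega)]
    rw [show ((t : Int) - vs.1).toNat = t - vs.1.toNat by omega]
    unfold padd
    rfl
  rw [hmapeq]
  have hne := candsF_ne h2
  rcases hcands : candsF t with _ | ⟨c, cs⟩
  · exact absurd hcands hne
  · simp only []
    rw [happ]
    congr 2
    rw [Fval_rec h1 hs hd, hcands]
    rfl

lemma foldB_inv : ∀ t : Nat,
    (PySem.List.pyRange 1 ((t : Int) + 1) 1).foldl solnB_body [(-1, -1)] = tblB t := by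
  intro t
  induction t with
  | zero =>
    rw [PySem.List.pyRange_one_eq_nil (by omega)]
    rfl
  | succ t ih =>
    rw [show ((t + 1 : Nat) : Int) + 1 = ((t : Int) + 1) + 1 by push_cast; ring]
    rw [PySem.List.pyRange_one_succ_right (by omega), List.foldl_append, ih]
    simp only [List.foldl]
    have := bodyB_step (t + 1) (by omega)
    rw [show ((t + 1 : Nat) : Int) = (t : Int) + 1 by push_cast; ring,
        show (t + 1) - 1 = t by omega] at this
    exact this

-- ---- final assembly ----
lemma solution_eq_model (target : Int) (hT : 0 ≤ target) :
    solution target =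
      if target = 0 then [-1, -1] else [(Fval target.toNat).1, (Fval target.toNat).2] := by
  have hcast : ((target.toNat : Nat) : Int) = target := by omega
  have hinv := foldA_inv target hT target.toNat (by omega)
  rw [hcast] at hinv
  show (PySem.List.pyGet? ((PySem.List.pyRange 1 (target + 1) 1).foldl (solnA_body target)
      ((PySem.List.pyRange 0 (target + 1) 1).map (fun _ => [-1, -1]))) target).getD [-1, -1] = _
  rw [tblA_zero target hT, hinv]
  unfold tblA
  rw [PySem.List.pyGet?_of_nonneg _ (by omega)]
  rw [List.getElem?_map, List.getElem?_range (by omega)]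
  simp only [Option.map_some, Option.getD_some]
  by_cases h0 : target = 0
  · rw [if_pos h0, if_neg (by omega)]
  · rw [if_neg h0, if_pos (by omega)]

lemma solution_alt_eq_model (target : Int) (hT : 0 ≤ target) :
    solution_alt target =
      if target = 0 then [-1, -1] else [(Fval target.toNat).1, (Fval target.toNat).2] := by
  have hcast : ((target.toNat : Nat) : Int) = target := by omega
  have hinv := foldB_inv target.toNat
  rw [hcast] at hinv
  show [(solnB_rd ((PySem.List.pyRange 1 (target + 1) 1).foldl solnB_body [(-1, -1)]) target).1,
        (solnB_rd ((PySem.List.pyRange 1 (target + 1) 1).foldl solnB_body [(-1, -1)]) target).2] = _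
  rw [hinv]
  unfold solnB_rd tblB
  rw [PySem.List.pyGet?_of_nonneg _ (by omega)]
  rw [List.getElem?_map, List.getElem?_range (by omega)]
  simp only [Option.map_some, Option.getD_some]
  by_cases h0 : target = 0
  · rw [if_pos h0, if_neg (by omega)]
  · rw [if_neg h0, if_pos (by omega)]

-- ===== VERDICT (by name: the statement is the Claim_ definition above) =====
theorem solution_spec : Claim_equal_solution := by
  intro target _ hpre
  unfold Spec_solution
  rw [solution_eq_model target hpre, solution_alt_eq_model target hpre]
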